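-- pv_equiv track=rewrite | github.com/Lemvein/Study | Сomputer mathematics/lab1/lab1.py | BordersUp
-- ===== SOURCE A (Python) =====
-- def Gorner(polinom,a):
--     b = [polinom[0]]
--     for i in range(len(polinom) - 1):
--         b.append(a * b[i] + polinom[i + 1])
--     return b
--
-- def BordersUp(polinom):
--     if polinom[0] < 0: polinom = [i * -1 for i in polinom]
--     for i in range(100000):
--         b = Gorner(polinom, i)
--         f = True
--         for j in b:
--             if j < 0:
--                 f = False
--                 break
--         if f == True:
--             break
--     return i
-- ===== SOURCE B (Python) =====
-- def BordersUp(polinom):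
--     # Binary search for the smallest a between 0 and 99999 whose Horner partial
--     # values are all nonnegative (the predicate is monotone in a).
--     if polinom[0] < 0:
--         polinom = [-c for c in polinom]
--     M = 0
--     for c in polinom:
--         M = max(M, abs(c))
--
--     def ok(a):
--         b = polinom[0]
--         if b < 0:
--             return False
--         for c in polinom[1:]:
--             if a >= 2 and b >= M:
--                 return True  # from here every value stays >= M >= 0
--             b = a * b + c
--             if b < 0:
--                 return False
--         return True
--
--     lo, hi = 0, 99999
--     while lo < hi:
--         mid = (lo + hi) // 2
--         if ok(mid):
--             hi = mid
--         else:
--             lo = mid + 1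
--     return lo
-- ===== Notes on version B (the rewrite author's own statement) =====
-- stated objective: alternative
-- what changed: Replaces A's linear scan over the whole candidate range (running full Horner at every candidate) by a binary search over that range, exploiting that the all-partial-Horner-values-nonnegative predicate is monotone in the evaluation point; the inner check short-circuits to success once the running value reaches the maximal absolute coefficient.
import Mathlib
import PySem

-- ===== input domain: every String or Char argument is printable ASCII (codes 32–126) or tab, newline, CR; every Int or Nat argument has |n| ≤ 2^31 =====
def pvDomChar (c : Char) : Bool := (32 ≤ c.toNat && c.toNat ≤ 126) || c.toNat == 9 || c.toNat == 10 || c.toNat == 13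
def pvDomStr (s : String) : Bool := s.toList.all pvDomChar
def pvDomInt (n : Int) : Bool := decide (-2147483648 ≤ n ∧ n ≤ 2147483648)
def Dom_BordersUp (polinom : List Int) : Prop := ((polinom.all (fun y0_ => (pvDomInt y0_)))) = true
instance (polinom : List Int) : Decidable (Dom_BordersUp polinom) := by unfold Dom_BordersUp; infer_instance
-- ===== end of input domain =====

-- B replaces A's linear scan of all candidates 0..99999 by a binary search over the
-- candidate range (the all-Horner-values-nonnegative predicate is monotone in the
-- evaluation point), with an early-success cutoff once the running value reaches
-- the maximal absolute coefficient.

-- ===== PORT A =====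
-- b.append(a*b[i] + polinom[i+1]) : each new element is a*previous + next coefficient
def gornerAux (a : Int) (prev : Int) : List Int → List Int
  | [] => []
  | c :: cs => (a * prev + c) :: gornerAux a (a * prev + c) cs

-- the first coefficient: Python raises there on the empty list; Pre_ excludes it, so the .getD default is never used
def Gorner (polinom : List Int) (a : Int) : List Int :=
  let b0 := (PySem.List.pyGet? polinom 0).getD 0
  b0 :: gornerAux a b0 (polinom.drop 1)

-- the inner 'for j in b: if j < 0: f = False; break' loop
def allNonneg : List Int → Bool
  | [] => true
  | j :: rest => if j < 0 then false else allNonneg rest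

-- 'for i in range(100000): ... if f == True: break' ; after a full loop i = last value
def loopA (polinom : List Int) : List Int → Int → Int
  | [], last => last
  | i :: rest, _ => if allNonneg (Gorner polinom i) then i else loopA polinom rest i

def BordersUp (polinom : List Int) : Int :=
  let polinom := if (PySem.List.pyGet? polinom 0).getD 0 < 0
                 then polinom.map (fun i => i * -1) else polinom
  loopA polinom (PySem.List.pyRange 0 100000 1) 0

-- ===== PORT B =====
-- the 'for c in polinom[1:]' loop of ok, carrying the running Horner value b;
-- once a >= 2 and b >= M (M bounds |c| for every coefficient) the value can
-- never drop below 0 again, so ok returns True early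
def okAux (a M : Int) : Int → List Int → Bool
  | _, [] => true
  | b, c :: cs =>
      if 2 ≤ a ∧ M ≤ b then true
      else if a * b + c < 0 then false else okAux a M (a * b + c) cs

-- ok(a): all Horner partial values nonnegative, short-circuiting both ways
def okB (polinom : List Int) (M : Int) (a : Int) : Bool :=
  let b := (PySem.List.pyGet? polinom 0).getD 0
  if b < 0 then false else okAux a M b (polinom.drop 1)

-- the 'while lo < hi' binary-search loop; lo, hi stay nonnegative so Nat (and Nat '/'
-- for Python '//' on nonnegative ints) is exact
def bsearch (polinom : List Int) (M : Int) (lo hi : Nat) : Nat :=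
  if h : lo < hi then
    let mid := (lo + hi) / 2
    if okB polinom M (mid : Int) then bsearch polinom M lo mid
    else bsearch polinom M (mid + 1) hi
  else lo
termination_by hi - lo
decreasing_by all_goals omega

def BordersUp_alt (polinom : List Int) : Int :=
  let polinom := if (PySem.List.pyGet? polinom 0).getD 0 < 0
                 then polinom.map (fun c => -c) else polinom
  let M := polinom.foldl (fun m c => max m |c|) 0
  (bsearch polinom M 0 99999 : Int)

-- ===== PRECONDITION & SPEC =====
-- A subscripts the first coefficient, an IndexError on the empty list; Pre_ excludes exactly that.
def Pre_BordersUp (polinom : List Int) : Prop := polinom ≠ []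
instance (polinom : List Int) : Decidable (Pre_BordersUp polinom) := by unfold Pre_BordersUp; infer_instance
def pvWitness_BordersUp : List Int := ([1, -3])
def Spec_BordersUp (polinom : List Int) (out : Int) : Prop := out = BordersUp_alt polinom
instance (polinom : List Int) (out : Int) : Decidable (Spec_BordersUp polinom out) := by unfold Spec_BordersUp; infer_instance

-- ===== CLAIM (what is proved, stated in full; the proofs are below) =====
def Claim_equal_BordersUp : Prop := ∀ (polinom : List Int), Dom_BordersUp polinom → Pre_BordersUp polinom → Spec_BordersUp polinom (BordersUp polinom)

-- ===== LEMMAS AND PROOFS =====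

-- propositional unfolding lemmas for loopA (rw with these instead of unfolding the
-- structural recursion on a stuck tail, which the kernel cannot reduce)
theorem loopA_nil (polinom : List Int) (last : Int) : loopA polinom [] last = last := rfl
theorem loopA_cons (polinom : List Int) (i : Int) (rest : List Int) (last : Int) :
    loopA polinom (i :: rest) last =
      if allNonneg (Gorner polinom i) then i else loopA polinom rest i := rfl

-- the max-abs fold of B bounds every element and its seed
theorem maxfold_init_le : ∀ (l : List Int) (m0 : Int),
    m0 ≤ l.foldl (fun m c => max m |c|) m0 := by
  intro l
  induction l with
  | nil => intro m0; simp
  | cons c cs ih =>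
      intro m0
      simp only [List.foldl]
      exact le_trans (le_max_left m0 |c|) (ih _)

theorem mem_le_maxfold : ∀ (l : List Int) (m0 x : Int), x ∈ l →
    |x| ≤ l.foldl (fun m c => max m |c|) m0 := by
  intro l
  induction l with
  | nil => intro _ _ h; simp at h
  | cons c cs ih =>
      intro m0 x hx
      rcases List.mem_cons.mp hx with h | h
      · subst h
        exact le_trans (le_max_right m0 |x|) (maxfold_init_le cs _)
      · exact ih _ x h

-- once 2 ≤ a and M ≤ b, every remaining Horner value stays ≥ M ≥ 0
theorem gornerAux_all_nonneg_of_big (a M : Int) (ha : 2 ≤ a) (hM0 : 0 ≤ M) :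
    ∀ (rest : List Int) (b : Int), (∀ c ∈ rest, |c| ≤ M) → M ≤ b →
    allNonneg (gornerAux a b rest) = true := by
  intro rest
  induction rest with
  | nil => intro b _ _; rfl
  | cons c cs ih =>
      intro b hbnd hb
      have hc : |c| ≤ M := hbnd c (List.mem_cons_self ..)
      have hstep : M ≤ a * b + c := by
        have h1 : -M ≤ c := (abs_le.mp hc).1
        nlinarith
      simp only [gornerAux, allNonneg]
      rw [if_neg (by omega)]
      exact ih (a * b + c) (fun x hx => hbnd x (List.mem_cons_of_mem _ hx)) hstep

-- the two ports' inner checks agree (M bounds the coefficients still to come)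
theorem okAux_eq_allNonneg (a M : Int) (hM0 : 0 ≤ M) : ∀ (rest : List Int) (b : Int),
    (∀ c ∈ rest, |c| ≤ M) →
    okAux a M b rest = allNonneg (gornerAux a b rest) := by
  intro rest
  induction rest with
  | nil => intro b _; rfl
  | cons c cs ih =>
      intro b hbnd
      simp only [okAux]
      by_cases hbig : 2 ≤ a ∧ M ≤ b
      · rw [if_pos hbig,
            gornerAux_all_nonneg_of_big a M hbig.1 hM0 (c :: cs) b hbnd hbig.2]
      · rw [if_neg hbig]
        simp only [gornerAux, allNonneg]
        split_ifs with h
        · rfl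
        · exact ih (a * b + c) (fun x hx => hbnd x (List.mem_cons_of_mem _ hx))

theorem okB_eq (polinom : List Int) (M a : Int) (hM0 : 0 ≤ M)
    (hbnd : ∀ c ∈ polinom.drop 1, |c| ≤ M) :
    okB polinom M a = allNonneg (Gorner polinom a) := by
  simp only [okB, Gorner, allNonneg]
  split_ifs with h
  · rfl
  · exact okAux_eq_allNonneg a M hM0 (polinom.drop 1) _ hbnd

-- monotonicity of the inner check in (a, b)
theorem okAux_mono (M : Int) : ∀ (rest : List Int) (a a' b b' : Int),
    0 ≤ a → a ≤ a' → 0 ≤ b → b ≤ b' →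
    okAux a M b rest = true → okAux a' M b' rest = true := by
  intro rest
  induction rest with
  | nil => intro a a' b b' _ _ _ _ _; rfl
  | cons c cs ih =>
      intro a a' b b' ha haa hb hbb hok
      simp only [okAux] at hok ⊢
      by_cases hbig' : 2 ≤ a' ∧ M ≤ b'
      · rw [if_pos hbig']
      · rw [if_neg hbig']
        have hbig : ¬ (2 ≤ a ∧ M ≤ b) := by
          intro ⟨h1, h2⟩; exact hbig' ⟨by omega, by omega⟩
        rw [if_neg hbig] at hok
        have hmul : a * b ≤ a' * b' := by nlinarith
        by_cases h1 : a * b + c < 0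
        · rw [if_pos h1] at hok; exact absurd hok (by simp)
        · rw [if_neg h1] at hok
          have h2 : ¬ a' * b' + c < 0 := by omega
          rw [if_neg h2]
          exact ih a a' (a * b + c) (a' * b' + c) ha haa (by omega) (by omega) hok

theorem okB_mono (polinom : List Int) (M a a' : Int)
    (h0 : 0 ≤ (PySem.List.pyGet? polinom 0).getD 0) (ha : 0 ≤ a) (haa : a ≤ a')
    (hok : okB polinom M a = true) : okB polinom M a' = true := by
  simp only [okB] at hok ⊢
  rw [if_neg (by omega)] at hok ⊢
  exact okAux_mono M _ a a' _ _ ha haa h0 le_rfl hok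

-- the characterisation both loops satisfy: r is the least candidate where the
-- check succeeds, or 99999 when it never does
def IsAns (q : List Int) (r : Int) : Prop :=
  0 ≤ r ∧ r ≤ 99999 ∧ (∀ j : Int, 0 ≤ j → j < r → allNonneg (Gorner q j) = false) ∧
    (r < 99999 → allNonneg (Gorner q r) = true)

theorem isAns_unique (q : List Int) (r1 r2 : Int) (h1 : IsAns q r1) (h2 : IsAns q r2) :
    r1 = r2 := by
  obtain ⟨h10, h19, h1f, h1t⟩ := h1
  obtain ⟨h20, h29, h2f, h2t⟩ := h2
  rcases lt_trichotomy r1 r2 with h | h | h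
  · have := h2f r1 h10 h
    have := h1t (by omega)
    simp_all
  · exact h
  · have := h1f r2 h20 h
    have := h2t (by omega)
    simp_all

-- A's loop satisfies the characterisation
theorem loopA_char (q : List Int) : ∀ (n : Nat) (last : Int), 1 ≤ n → n ≤ 100000 →
    (∀ j : Int, 0 ≤ j → j < 100000 - (n : Int) → allNonneg (Gorner q j) = false) →
    IsAns q (loopA q (PySem.List.pyRange (100000 - (n : Int)) 100000 1) last) := by
  intro n
  induction n with
  | zero => intro _ h; omega
  | succ m ih =>
      intro last _ hle hbelow
      have hk : (100000 : Int) - (↑(m + 1) : Int) < 100000 := by push_cast; omega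
      rw [PySem.List.pyRange_one_cons hk]
      set k : Int := 100000 - (↑(m + 1) : Int) with hkdef
      rw [loopA_cons]
      by_cases hok : allNonneg (Gorner q k) = true
      · rw [if_pos hok]
        exact ⟨by omega, by omega, hbelow, fun _ => hok⟩
      · rw [if_neg hok]
        rcases Nat.eq_or_lt_of_le (show 1 ≤ m + 1 by omega) with h1 | h1
        · -- m = 0 : the remaining range is empty, loopA returns k = 99999
          have hm : m = 0 := by omega
          subst hm
          rw [show k + 1 = (100000 : Int) by omega,
              PySem.List.pyRange_one_eq_nil le_rfl, loopA_nil]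
          refine ⟨by omega, by omega, ?_, ?_⟩
          · intro j hj0 hj; exact hbelow j hj0 (by omega)
          · intro h; omega
        · have harg : ∀ j : Int, 0 ≤ j → j < 100000 - (m : Int) →
              allNonneg (Gorner q j) = false := by
            intro j hj0 hj
            rcases lt_or_ge j k with h | h
            · exact hbelow j hj0 h
            · have hj' : j = k := by omega
              rw [hj']
              simpa using hok
          have := ih k (by omega) (by omega) harg
          rwa [show (100000 : Int) - (↑m : Int) = k + 1 by omega] at this

-- B's loop satisfies the characterisation (uses monotonicity for the lower invariant)
theorem bsearch_char (q : List Int) (M : Int)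
    (h0 : 0 ≤ (PySem.List.pyGet? q 0).getD 0) (hM0 : 0 ≤ M)
    (hbnd : ∀ c ∈ q.drop 1, |c| ≤ M) :
    ∀ (d lo hi : Nat), hi - lo = d → lo ≤ hi → hi ≤ 99999 →
    (∀ j : Int, 0 ≤ j → j < (lo : Int) → okB q M j = false) →
    (hi = 99999 ∨ okB q M (hi : Int) = true) →
    IsAns q ((bsearch q M lo hi : Nat) : Int) := by
  intro d
  induction d using Nat.strong_induction_on with
  | _ d ih =>
      intro lo hi hd hle h99 hbelow hhi
      rw [bsearch]
      by_cases h : lo < hi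
      · rw [dif_pos h]
        simp only
        set mid := (lo + hi) / 2 with hmid
        by_cases hok : okB q M (mid : Int) = true
        · rw [if_pos hok]
          exact ih (mid - lo) (by omega) lo mid rfl (by omega) (by omega) hbelow
            (Or.inr hok)
        · rw [if_neg hok]
          refine ih (hi - (mid + 1)) (by omega) (mid + 1) hi rfl (by omega) h99 ?_ hhi
          intro j hj0 hj
          rcases lt_or_ge j (lo : Int) with hl | hl
          · exact hbelow j hj0 hl
          · by_contra hc
            have hjt : okB q M j = true := by
              cases hb : okB q M j with
              | false => exact absurd hb hc
              | true => rfl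
            have : okB q M (mid : Int) = true :=
              okB_mono q M j (mid : Int) h0 hj0 (by push_cast at hj ⊢; omega) hjt
            exact hok this
      · rw [dif_neg h]
        have hlh : lo = hi := by omega
        refine ⟨by positivity, by exact_mod_cast (by omega : lo ≤ 99999), ?_, ?_⟩
        · intro j hj0 hj
          rw [← okB_eq q M j hM0 hbnd]
          exact hbelow j hj0 hj
        · intro hlt
          rw [← okB_eq q M _ hM0 hbnd]
          rcases hhi with h9 | hok
          · exfalso; omega
          · rwa [hlh]

-- the normalised coefficient lists of the two ports coincide, and their head is ≥ 0
theorem norm_eq (polinom : List Int) :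
    (if (PySem.List.pyGet? polinom 0).getD 0 < 0
     then polinom.map (fun i => i * -1) else polinom) =
    (if (PySem.List.pyGet? polinom 0).getD 0 < 0
     then polinom.map (fun c => -c) else polinom) := by
  split_ifs with h
  · apply List.map_congr_left; intro x _; ring
  · rfl

theorem norm_head_nonneg (polinom : List Int) (hne : polinom ≠ []) :
    0 ≤ (PySem.List.pyGet? (if (PySem.List.pyGet? polinom 0).getD 0 < 0
          then polinom.map (fun c => -c) else polinom) 0).getD 0 := by
  cases polinom with
  | nil => exact absurd rfl hne
  | cons h t =>
      simp only [PySem.List.pyGet?_zero_cons, Option.getD_some]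
      split_ifs with hh
      · simp only [List.map_cons, PySem.List.pyGet?_zero_cons, Option.getD_some]; omega
      · simp only [PySem.List.pyGet?_zero_cons, Option.getD_some]; omega

-- ===== VERDICT (by name: the statement is the Claim_ definition above) =====
theorem BordersUp_spec : Claim_equal_BordersUp := by
  intro polinom _ hpre
  unfold Spec_BordersUp BordersUp BordersUp_alt
  simp only [norm_eq polinom]
  set q := (if (PySem.List.pyGet? polinom 0).getD 0 < 0
            then polinom.map (fun c => -c) else polinom) with hq
  set M := q.foldl (fun m c => max m |c|) 0 with hM
  have h0 : 0 ≤ (PySem.List.pyGet? q 0).getD 0 := norm_head_nonneg polinom hpre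
  have hM0 : 0 ≤ M := maxfold_init_le q 0
  have hbnd : ∀ c ∈ q.drop 1, |c| ≤ M := by
    intro c hc
    exact mem_le_maxfold q 0 c (List.mem_of_mem_drop hc)
  have hA : IsAns q (loopA q (PySem.List.pyRange 0 100000 1) 0) := by
    have := loopA_char q 100000 0 (by omega) le_rfl
      (by intro j hj0 hj; push_cast at hj; omega)
    simpa using this
  have hB : IsAns q ((bsearch q M 0 99999 : Nat) : Int) := by
    refine bsearch_char q M h0 hM0 hbnd 99999 0 99999 rfl (by omega) le_rfl ?_
      (Or.inl rfl)
    intro j hj0 hj; simp at hj; omega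
  exact isAns_unique q _ _ hA hB
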